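-- pv_equiv track=rewrite | github.com/olajacob/nm2026 | tripletex/agent.py | _tripletex_get_path_is_session_cacheable
-- ===== SOURCE A (Python) =====
-- def _tripletex_get_path_is_session_cacheable(path_only: str) -> bool:
--     """Safe per-`/solve` GET cache: static chart / type lists — not invoices, vouchers, orders."""
--     for prefix in (
--         "/ledger/account",
--         "/invoice/paymentType",
--         "/travelExpense/paymentType",
--         "/salary/type",
--         "/ledger/vatType",
--     ):
--         if path_only == prefix or path_only.startswith(prefix + "/"):
--             return True
--     return False
-- ===== SOURCE B (Python) =====
-- _SESSION_CACHEABLE_PREFIXES = frozenset((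
--     "/ledger/account",
--     "/invoice/paymentType",
--     "/travelExpense/paymentType",
--     "/salary/type",
--     "/ledger/vatType",
-- ))
--
--
-- def _tripletex_get_path_is_session_cacheable(path_only: str) -> bool:
--     """Safe per-`/solve` GET cache: static chart / type lists — not invoices, vouchers, orders."""
--     if path_only in _SESSION_CACHEABLE_PREFIXES:
--         return True
--     for i, ch in enumerate(path_only):
--         if ch == '/' and path_only[:i] in _SESSION_CACHEABLE_PREFIXES:
--             return True
--     return False
-- ===== Notes on version B (the rewrite author's own statement) =====
-- stated objective: alternative
-- what changed: Instead of scanning the five-prefix list with == / startswith for each prefix, B stores the prefixes in a frozenset and tests the path itself and each of its slash-boundary truncations for set membership.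
import Mathlib
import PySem

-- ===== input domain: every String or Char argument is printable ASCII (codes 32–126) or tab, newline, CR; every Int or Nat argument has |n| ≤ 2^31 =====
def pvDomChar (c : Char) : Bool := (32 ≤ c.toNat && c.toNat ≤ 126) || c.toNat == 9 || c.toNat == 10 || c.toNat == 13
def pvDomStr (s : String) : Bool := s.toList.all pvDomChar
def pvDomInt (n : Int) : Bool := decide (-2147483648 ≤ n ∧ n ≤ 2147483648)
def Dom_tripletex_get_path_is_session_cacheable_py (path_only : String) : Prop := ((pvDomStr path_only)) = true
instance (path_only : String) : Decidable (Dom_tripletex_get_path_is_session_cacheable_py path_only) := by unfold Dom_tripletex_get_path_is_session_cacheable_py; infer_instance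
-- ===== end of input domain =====

-- B replaces A's scan over the prefix list with startswith by O(1) set lookups of the
-- path's own slash-boundary truncations (alternative decomposition; same observable result).

-- ===== PORT A =====
-- A's literal tuple of prefixes
def pvPrefixesA : List String :=
  ["/ledger/account", "/invoice/paymentType", "/travelExpense/paymentType",
   "/salary/type", "/ledger/vatType"]

def tripletex_get_path_is_session_cacheable_py (path_only : String) : Bool :=
  -- for prefix in (...): if path_only == prefix or path_only.startswith(prefix + "/"): return True / return False
  pvPrefixesA.any (fun pre =>
    path_only == pre || PySem.Str.startswith path_only (pre ++ "/"))

-- ===== PORT B =====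
-- B's module-level frozenset of prefixes
def pvCacheableSet : PySem.Set String :=
  PySem.Set.ofList
    ["/ledger/account", "/invoice/paymentType", "/travelExpense/paymentType",
     "/salary/type", "/ledger/vatType"]

def tripletex_get_path_is_session_cacheable_py_alt (path_only : String) : Bool :=
  if PySem.Set.contains pvCacheableSet path_only then true
  else
    -- for i, ch in enumerate(path_only): if ch == '/' and path_only[:i] in SET: return True / return False
    (PySem.List.enumerate path_only.toList).any (fun ic =>
      ic.2 == '/' && PySem.Set.contains pvCacheableSet (PySem.Str.slice path_only none (some ic.1)))

-- ===== PRECONDITION & SPEC =====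
def Spec_tripletex_get_path_is_session_cacheable_py (path_only : String) (out : Bool) : Prop := out = tripletex_get_path_is_session_cacheable_py_alt path_only
instance (path_only : String) (out : Bool) : Decidable (Spec_tripletex_get_path_is_session_cacheable_py path_only out) := by unfold Spec_tripletex_get_path_is_session_cacheable_py; infer_instance

-- ===== CLAIM (what is proved, stated in full; the proofs are below) =====
def Claim_equal_tripletex_get_path_is_session_cacheable_py : Prop := ∀ (path_only : String), Dom_tripletex_get_path_is_session_cacheable_py path_only → Spec_tripletex_get_path_is_session_cacheable_py path_only (tripletex_get_path_is_session_cacheable_py path_only)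

-- ===== LEMMAS AND PROOFS =====

-- A list-with-one-extra-element is a prefix of l exactly when l, cut at some index k,
-- yields the list with the extra element sitting at position k.
theorem pv_snoc_prefix_iff (q l : List Char) (c : Char) :
    (q ++ [c]) <+: l ↔ ∃ k, l.take k = q ∧ l[k]? = some c := by
  constructor
  · rintro ⟨t, ht⟩
    refine ⟨q.length, ?_, ?_⟩
    · rw [← ht, List.append_assoc, List.take_left]
    · rw [← ht, List.append_assoc]
      simp
  · rintro ⟨k, hq, hc⟩
    obtain ⟨hk, hget⟩ := List.getElem?_eq_some_iff.mp hc
    refine ⟨l.drop (k + 1), ?_⟩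
    calc q ++ [c] ++ l.drop (k + 1)
        = l.take k ++ l[k]?.toList ++ l.drop (k + 1) := by rw [hq, hc]; rfl
      _ = l.take (k + 1) ++ l.drop (k + 1) := by rw [← List.take_add_one]
      _ = l := List.take_append_drop _ _

-- the set literal is just the five-element list
-- the set literal is just the five-element list
theorem pv_set_eq : pvCacheableSet = pvPrefixesA := by decide

theorem pv_contains_iff (s : String) :
    PySem.Set.contains pvCacheableSet s = true ↔ s ∈ pvPrefixesA := by
  rw [pv_set_eq]
  exact List.contains_iff_mem

-- the toList of B's slash-boundary truncation at k
theorem pv_slice_toList (s : String) (k : ℕ) :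
    (PySem.Str.slice s none (some (k : Int))).toList = s.toList.take k := by
  rw [PySem.Str.toList_slice, PySem.Chars.slice_eq_listSlice,
    PySem.List.slice_to _ (Int.natCast_nonneg k)]
  simp

theorem pv_main (path_only : String) :
    tripletex_get_path_is_session_cacheable_py path_only
      = tripletex_get_path_is_session_cacheable_py_alt path_only := by
  rw [Bool.eq_iff_iff]
  unfold tripletex_get_path_is_session_cacheable_py
    tripletex_get_path_is_session_cacheable_py_alt
  split
  · -- set membership holds: B is true; A matches via path_only == prefix
    rename_i hmem
    refine iff_of_true ?_ rfl
    rw [List.any_eq_true]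
    exact ⟨path_only, (pv_contains_iff _).mp hmem, by simp⟩
  · -- set membership fails
    rename_i hnmem
    rw [List.any_eq_true, List.any_eq_true]
    constructor
    · rintro ⟨p, hp, hmatch⟩
      rw [Bool.or_eq_true] at hmatch
      rcases hmatch with heq | hsw
      · exact absurd ((pv_contains_iff _).mpr (by rwa [← eq_of_beq heq] at hp)) hnmem
      · -- startswith (p ++ "/"): B finds the slash-boundary at index |p|
        rw [PySem.Str.startswith_eq, PySem.Chars.startswith_iff] at hsw
        have hpre : (p.toList ++ ['/']) <+: path_only.toList := by
          simpa using hsw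
        obtain ⟨k, htake, hget⟩ := (pv_snoc_prefix_iff _ _ _).mp hpre
        obtain ⟨hk, hg⟩ := List.getElem?_eq_some_iff.mp hget
        refine ⟨((k : Int), '/'), ?_, ?_⟩
        · rw [PySem.List.mem_enumerate_iff]
          exact ⟨k, hk, by simp [hg]⟩
        · simp only [beq_self_eq_true, Bool.true_and]
          rw [pv_contains_iff]
          have hq : PySem.Str.slice path_only none (some (k : Int)) = p := by
            rw [← String.toList_inj, pv_slice_toList, htake]
          rw [hq]; exact hp
    · rintro ⟨ic, hmem', hf⟩
      rw [PySem.List.mem_enumerate_iff] at hmem'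
      obtain ⟨k, hk, hic⟩ := hmem'
      subst hic
      simp only [zero_add, Bool.and_eq_true] at hf
      obtain ⟨hc, hin⟩ := hf
      rw [pv_contains_iff] at hin
      refine ⟨_, hin, ?_⟩
      rw [Bool.or_eq_true]
      right
      rw [PySem.Str.startswith_eq, PySem.Chars.startswith_iff]
      have hpre : ((PySem.Str.slice path_only none (some (k : Int))).toList ++ ['/'])
          <+: path_only.toList :=
        (pv_snoc_prefix_iff _ _ _).mpr
          ⟨k, by rw [pv_slice_toList], List.getElem?_eq_some_iff.mpr ⟨hk, eq_of_beq hc⟩⟩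
      rw [String.toList_append]
      simpa using hpre

-- ===== VERDICT (by name: the statement is the Claim_ definition above) =====
theorem tripletex_get_path_is_session_cacheable_py_spec : Claim_equal_tripletex_get_path_is_session_cacheable_py := by
  intro path _
  unfold Spec_tripletex_get_path_is_session_cacheable_py
  exact pv_main path
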